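-- pv_equiv track=rewrite | github.com/siri666942/MetaphysicsAI | backend/divination.py | _flip_trigram_yao
-- ===== SOURCE A (Python) =====
-- BAGUA = {
--     1: {'name': '乾', 'nature': '天', 'wuxing': '金', 'symbol': '☰', 'lines': (1, 1, 1)},
--     2: {'name': '兑', 'nature': '泽', 'wuxing': '金', 'symbol': '☱', 'lines': (1, 1, 0)},
--     3: {'name': '离', 'nature': '火', 'wuxing': '火', 'symbol': '☲', 'lines': (1, 0, 1)},
--     4: {'name': '震', 'nature': '雷', 'wuxing': '木', 'symbol': '☳', 'lines': (1, 0, 0)},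
--     5: {'name': '巽', 'nature': '风', 'wuxing': '木', 'symbol': '☴', 'lines': (0, 1, 1)},
--     6: {'name': '坎', 'nature': '水', 'wuxing': '水', 'symbol': '☵', 'lines': (0, 1, 0)},
--     7: {'name': '艮', 'nature': '山', 'wuxing': '土', 'symbol': '☶', 'lines': (0, 0, 1)},
--     8: {'name': '坤', 'nature': '地', 'wuxing': '土', 'symbol': '☷', 'lines': (0, 0, 0)},
-- }
--
-- def _flip_trigram_yao(gua_num, yao_pos):
--     """翻转三画卦中指定爻位（1=初爻, 2=中爻, 3=上爻），返回新卦数"""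
--     lines = list(BAGUA[gua_num]['lines'])
--     lines[yao_pos - 1] = 1 - lines[yao_pos - 1]
--     target = tuple(lines)
--     for num, data in BAGUA.items():
--         if data['lines'] == target:
--             return num
--     return gua_num  # fallback
-- ===== SOURCE B (Python) =====
-- # Trigram g's lines are the 3-bit big-endian encoding of 8 - g, biggest line first.
-- _LINES = ((1, 1, 1), (1, 1, 0), (1, 0, 1), (1, 0, 0),
--           (0, 1, 1), (0, 1, 0), (0, 0, 1), (0, 0, 0))
--
-- def _flip_trigram_yao(gua_num, yao_pos):
--     """翻转三画卦中指定爻位（1=初爻, 2=中爻, 3=上爻），返回新卦数"""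
--     old = _LINES[gua_num - 1][yao_pos - 1]
--     weight = 4 >> ((yao_pos - 1) % 3)   # bit weight of that line: 4, 2 or 1
--     # toggling one bit of 8 - gua_num moves gua_num by -weight/+weight
--     return gua_num + weight * (2 * old - 1)
-- ===== Notes on version B (the rewrite author's own statement) =====
-- stated objective: simpler
-- what changed: B replaces A's dict-of-dicts lookup, list copy/mutation and linear scan over BAGUA by a plain tuple of line-triples indexed by gua_num-1 plus a one-bit arithmetic toggle (lines are the 3-bit encoding of 8-gua_num), so the new trigram number is gua_num +/- the flipped line's bit weight with no search.
-- outside the precondition, e.g. on _flip_trigram_yao(0, 1): A raises KeyError, B returns -4; on _flip_trigram_yao(1, 5): A raises IndexError, B raises IndexError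
import Mathlib
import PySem

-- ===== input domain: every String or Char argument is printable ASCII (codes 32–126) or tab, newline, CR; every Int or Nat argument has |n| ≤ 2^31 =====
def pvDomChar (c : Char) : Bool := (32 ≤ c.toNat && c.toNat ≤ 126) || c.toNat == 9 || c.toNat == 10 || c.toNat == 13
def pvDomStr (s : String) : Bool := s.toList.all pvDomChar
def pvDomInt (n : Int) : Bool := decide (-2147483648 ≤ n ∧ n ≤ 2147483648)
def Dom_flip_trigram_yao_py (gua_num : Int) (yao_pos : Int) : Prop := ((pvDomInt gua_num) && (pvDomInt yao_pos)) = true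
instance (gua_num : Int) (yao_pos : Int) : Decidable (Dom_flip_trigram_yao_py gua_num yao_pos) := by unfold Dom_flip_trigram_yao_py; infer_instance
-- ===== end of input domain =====

-- B replaces A's dict-of-dicts and linear scan by a plain tuple of line-triples indexed by
-- gua_num-1 and a one-bit arithmetic toggle (the lines of trigram g are the 3-bit encoding of
-- 8-g), so no search is needed (simpler; A's KeyError/IndexError inputs are excluded by Pre_).

-- ===== PORT A =====
-- the BAGUA table: value = (name, nature, wuxing, symbol, lines)
def pvBagua : PySem.Dict Int (String × String × String × String × List Int) :=
  PySem.Dict.mk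
  [ (1, ("乾", "天", "金", "☰", [1, 1, 1])),
    (2, ("兑", "泽", "金", "☱", [1, 1, 0])),
    (3, ("离", "火", "火", "☲", [1, 0, 1])),
    (4, ("震", "雷", "木", "☳", [1, 0, 0])),
    (5, ("巽", "风", "木", "☴", [0, 1, 1])),
    (6, ("坎", "水", "水", "☵", [0, 1, 0])),
    (7, ("艮", "山", "土", "☶", [0, 0, 1])),
    (8, ("坤", "地", "土", "☷", [0, 0, 0])) ]

-- the 'for num, data in BAGUA.items(): if data['lines'] == target: return num' loop
def pvFindGua (items : List (Int × (String × String × String × String × List Int)))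
    (target : List Int) (fallback : Int) : Int :=
  match items with
  | [] => fallback
  | (num, data) :: rest =>
      if data.2.2.2.2 = target then num else pvFindGua rest target fallback

def flip_trigram_yao_py (gua_num : Int) (yao_pos : Int) : Int :=
  match PySem.Dict.get? pvBagua gua_num with
  | none => 0      -- KeyError: outside Pre_
  | some data =>
      let lines := data.2.2.2.2
      match PySem.List.pyGet? lines (yao_pos - 1) with
      | none => 0  -- IndexError: outside Pre_
      | some old =>
          let lines' := PySem.List.pySetD lines (yao_pos - 1) (1 - old)
          pvFindGua pvBagua.items lines' gua_num

-- ===== PORT B =====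
-- B's table _LINES: trigram lines in trigram order, indexed by gua_num - 1
def pvLinesTable : List (Int × Int × Int) :=
  [(1, 1, 1), (1, 1, 0), (1, 0, 1), (1, 0, 0), (0, 1, 1), (0, 1, 0), (0, 0, 1), (0, 0, 0)]

def flip_trigram_yao_py_alt (gua_num : Int) (yao_pos : Int) : Int :=
  match PySem.List.pyGet? pvLinesTable (gua_num - 1) with
  | none => 0      -- IndexError: outside Pre_
  | some t =>
      match PySem.List.pyGet? [t.1, t.2.1, t.2.2] (yao_pos - 1) with
      | none => 0  -- IndexError: outside Pre_
      | some old =>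
          -- 4 >> ((yao_pos - 1) % 3): the shift is 0, 1 or 2, so this division is exact
          let weight : Int := 4 / 2 ^ (PySem.Int.mod (yao_pos - 1) 3).toNat
          gua_num + weight * (2 * old - 1)

-- ===== PRECONDITION & SPEC =====
-- Pre_: exactly the inputs where A returns (gua_num a BAGUA key, yao_pos-1 a valid
-- Python index — negative positions down to -2 wrap — into the 3-line list).
def Pre_flip_trigram_yao_py (gua_num : Int) (yao_pos : Int) : Prop :=
  (1 ≤ gua_num ∧ gua_num ≤ 8) ∧ (-2 ≤ yao_pos ∧ yao_pos ≤ 3)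
instance (gua_num : Int) (yao_pos : Int) : Decidable (Pre_flip_trigram_yao_py gua_num yao_pos) := by
  unfold Pre_flip_trigram_yao_py; infer_instance

def pvWitness_flip_trigram_yao_py : Int × Int := (1, 1)

def Spec_flip_trigram_yao_py (gua_num : Int) (yao_pos : Int) (out : Int) : Prop :=
  out = flip_trigram_yao_py_alt gua_num yao_pos
instance (gua_num : Int) (yao_pos : Int) (out : Int) : Decidable (Spec_flip_trigram_yao_py gua_num yao_pos out) := by
  unfold Spec_flip_trigram_yao_py; infer_instance

-- ===== CLAIM (what is proved, stated in full; the proofs are below) =====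
def Claim_equal_flip_trigram_yao_py : Prop := ∀ (gua_num : Int) (yao_pos : Int), Dom_flip_trigram_yao_py gua_num yao_pos → Pre_flip_trigram_yao_py gua_num yao_pos → Spec_flip_trigram_yao_py gua_num yao_pos (flip_trigram_yao_py gua_num yao_pos)

-- ===== LEMMAS AND PROOFS =====

-- ===== VERDICT (by name: the statement is the Claim_ definition above) =====
theorem flip_trigram_yao_py_spec : Claim_equal_flip_trigram_yao_py := by
  intro g y _ hpre
  unfold Spec_flip_trigram_yao_py
  obtain ⟨⟨hg1, hg2⟩, hy1, hy2⟩ := hpre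
  interval_cases g <;> interval_cases y <;> decide
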